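-- pv_equiv track=rewrite | github.com/devqw010102/Python | codingTest/develop.py | develop
-- ===== SOURCE A (Python) =====
-- import math
--
-- def develop(progresses, speeds) :
--     answer = []
--     days = []
--
--     for progress, speed in zip(progresses, speeds) :
--         count = math.ceil((100 - progress) / speed)
--         days.append(count)
--
--     if not days : return []
--     max_day = days[0]
--     count = 0
--
--     for day in days :
--         if day <= max_day :
--             count += 1
--         else :
--             answer.append(count)
--             max_day = day
--             count = 1
--
--     answer.append(count)
--     return answer
-- ===== SOURCE B (Python) =====
-- import math
-- from collections import deque
--
-- def develop(progresses, speeds):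
--     days = deque(math.ceil((100 - p) / s) for p, s in zip(progresses, speeds))
--     answer = []
--     while days:
--         lead = days.popleft()
--         count = 1
--         while days and days[0] <= lead:
--             days.popleft()
--             count += 1
--         answer.append(count)
--     return answer
-- ===== Notes on version B (the rewrite author's own statement) =====
-- stated objective: idiomatic
-- what changed: B builds the completion days as a deque and consumes it front-to-back in nested batch-popping while-loops, instead of A's flat single pass with a running max_day/count and a trailing append.
import Mathlib
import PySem

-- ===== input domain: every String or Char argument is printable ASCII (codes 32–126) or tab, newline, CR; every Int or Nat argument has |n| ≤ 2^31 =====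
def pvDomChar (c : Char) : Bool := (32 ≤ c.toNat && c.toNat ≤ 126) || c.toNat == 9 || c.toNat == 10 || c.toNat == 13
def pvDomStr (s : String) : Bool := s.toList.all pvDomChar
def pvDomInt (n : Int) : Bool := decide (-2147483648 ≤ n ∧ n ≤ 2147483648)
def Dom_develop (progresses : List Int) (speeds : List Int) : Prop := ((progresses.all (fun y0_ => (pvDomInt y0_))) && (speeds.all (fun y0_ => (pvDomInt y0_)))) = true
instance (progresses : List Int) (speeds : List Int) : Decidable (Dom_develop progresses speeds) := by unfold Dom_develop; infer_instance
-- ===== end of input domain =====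

-- B changes the control flow (deque consumed in nested batch-popping loops vs A's flat scan); equivalent, not faster.

-- ===== PORT A =====
-- math.ceil((100-p)/s): on Dom (|ints| ≤ 2^31) Python's float division is exact enough that
-- math.ceil of it equals the true integer ceiling, ceil(a/s) = -((-a) floordiv s) (Python floor division).
def pyCeilDiv (a : Int) (s : Int) : Int := -(PySem.Int.floordiv (-a) s)

def developStep (st : List Int × Int × Int) (day : Int) : List Int × Int × Int :=
  if day ≤ st.2.1 then (st.1, st.2.1, st.2.2 + 1)
  else (st.1 ++ [st.2.2], day, 1)

def develop (progresses : List Int) (speeds : List Int) : List Int :=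
  let days := (progresses.zip speeds).foldl (fun acc ps => acc ++ [pyCeilDiv (100 - ps.1) ps.2]) []
  match days with
  | [] => []
  | d0 :: _ =>
    let st := days.foldl developStep ([], d0, 0)
    st.1 ++ [st.2.2]

-- ===== PORT B =====
-- inner while: pop leading days ≤ lead, returning (number popped, remaining queue)
def popLe (lead : Int) : List Int → Int × List Int
  | [] => (0, [])
  | d :: ds => if d ≤ lead then let r := popLe lead ds; (r.1 + 1, r.2) else (0, d :: ds)

theorem popLe_len (lead : Int) : ∀ ds : List Int, (popLe lead ds).2.length ≤ ds.length := by
  intro ds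
  induction ds with
  | nil => simp [popLe]
  | cons d ds ih =>
    simp only [popLe]
    split
    · exact Nat.le_succ_of_le ih
    · simp

-- outer while over the queue
def batches : List Int → List Int
  | [] => []
  | lead :: rest =>
    let r := popLe lead rest
    (1 + r.1) :: batches r.2
termination_by ds => ds.length
decreasing_by
  exact Nat.lt_succ_of_le (popLe_len lead rest)

def develop_alt (progresses : List Int) (speeds : List Int) : List Int :=
  batches ((progresses.zip speeds).map (fun ps => pyCeilDiv (100 - ps.1) ps.2))

-- ===== PRECONDITION & SPEC =====
-- Pre_ excludes inputs where some paired speed is 0: both A and B raise ZeroDivisionError there.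
def Pre_develop (progresses : List Int) (speeds : List Int) : Prop :=
  ∀ ps ∈ progresses.zip speeds, ps.2 ≠ 0

instance (progresses : List Int) (speeds : List Int) : Decidable (Pre_develop progresses speeds) := by
  unfold Pre_develop; infer_instance

def pvWitness_develop : List Int × List Int := ([93, 30, 55], [1, 30, 5])

def Spec_develop (progresses : List Int) (speeds : List Int) (out : List Int) : Prop := out = develop_alt progresses speeds
instance (progresses : List Int) (speeds : List Int) (out : List Int) : Decidable (Spec_develop progresses speeds out) := by unfold Spec_develop; infer_instance

-- ===== CLAIM (what is proved, stated in full; the proofs are below) =====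
def Claim_equal_develop : Prop := ∀ (progresses : List Int) (speeds : List Int), Dom_develop progresses speeds → Pre_develop progresses speeds → Spec_develop progresses speeds (develop progresses speeds)

-- ===== LEMMAS AND PROOFS =====

-- A's days list (foldl-append) equals B's days list (map)
theorem days_eq (l : List (Int × Int)) :
    l.foldl (fun acc ps => acc ++ [pyCeilDiv (100 - ps.1) ps.2]) []
      = l.map (fun ps => pyCeilDiv (100 - ps.1) ps.2) := by
  have h : ∀ acc : List Int,
      l.foldl (fun acc ps => acc ++ [pyCeilDiv (100 - ps.1) ps.2]) acc
        = acc ++ l.map (fun ps => pyCeilDiv (100 - ps.1) ps.2) := by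
    induction l with
    | nil => intro acc; simp
    | cons p t ih => intro acc; simp [List.foldl, ih]
  simpa using h []

-- A's flat scan from state (ans, md, c), finalized with the trailing append,
-- equals ans ++ the batch-count of the current run followed by B's batches of the rest.
theorem loopA_eq (n : Nat) : ∀ (days : List Int), days.length = n → ∀ (md c : Int) (ans : List Int),
    (let st := days.foldl developStep (ans, md, c); st.1 ++ [st.2.2])
      = ans ++ (c + (popLe md days).1) :: batches (popLe md days).2 := by
  induction n using Nat.strong_induction_on with
  | _ n ih =>
    intro days hlen md c ans
    cases days with
    | nil => simp [popLe, batches]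
    | cons d ds =>
      have hds : ds.length < n := by simp [← hlen]
      simp only [List.foldl_cons, developStep]
      by_cases hd : d ≤ md
      · simp only [if_pos hd, popLe]
        rw [ih ds.length hds ds rfl md (c + 1) ans]
        have : c + 1 + (popLe md ds).1 = c + ((popLe md ds).1 + 1) := by ring
        rw [this]
      · simp only [if_neg hd, popLe]
        rw [ih ds.length hds ds rfl d 1 (ans ++ [c])]
        simp only [batches]
        simp

theorem develop_eq_alt (progresses speeds : List Int) :
    develop progresses speeds = develop_alt progresses speeds := by
  unfold develop develop_alt
  rw [days_eq]
  set days := (progresses.zip speeds).map (fun ps => pyCeilDiv (100 - ps.1) ps.2) with hdays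
  cases days with
  | nil => simp [batches]
  | cons d0 rest =>
    have h := loopA_eq rest.length rest rfl d0 1 []
    simp only [List.foldl, developStep, le_refl, if_pos]
    simp only [List.nil_append] at h
    simp [h, batches]

-- ===== VERDICT (by name: the statement is the Claim_ definition above) =====
theorem develop_spec : Claim_equal_develop := by
  intro progresses speeds _ _
  unfold Spec_develop
  exact develop_eq_alt progresses speeds
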